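-- pv_equiv track=rewrite | github.com/bobleesj/cif-filter-copy | test-modify.py | get_atom_site_loop_end_start_line_indexes
-- ===== SOURCE A (Python) =====
-- def get_atom_site_loop_end_start_line_indexes(lines, start_keyword):
--     """
--     Find the start and end indexes of a section in the CIF file.
--
--     :param lines: List of all lines in the CIF file.
--     :param start_keyword: The keyword marking the beginning of the section.
--     :return: A tuple containing the start and end indexes.
--     """
--     start_index = None
--     end_index = None
--
--     # Find the start index
--     for i, line in enumerate(lines):
--         if start_keyword in line:
--             start_index = i + 1
--             break
--
--     if start_index is None:
--         return None, None
--
--     # Find the end index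
--     for i in range(start_index, len(lines)):
--         if lines[i].strip() == '':
--             end_index = i
--             break
--
--     return start_index, end_index
-- ===== SOURCE B (Python) =====
-- def get_atom_site_loop_end_start_line_indexes(lines, start_keyword):
--     """Index-table approach: collect the indexes of every keyword match and of
--     every blank line up front, then binary-search the sorted blank-index list
--     for the first blank at/after the section start."""
--     matches = [i for i, line in enumerate(lines) if start_keyword in line]
--     if not matches:
--         return None, None
--     start_index = matches[0] + 1
--     blanks = [i for i, line in enumerate(lines) if line.strip() == '']
--     lo, hi = 0, len(blanks)
--     while lo < hi:
--         mid = (lo + hi) // 2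
--         if blanks[mid] < start_index:
--             lo = mid + 1
--         else:
--             hi = mid
--     end_index = blanks[lo] if lo < len(blanks) else None
--     return start_index, end_index
-- ===== Notes on version B (the rewrite author's own statement) =====
-- stated objective: alternative
-- what changed: Instead of A's sequential seek-keyword-then-seek-next-blank scans, B builds index tables (all keyword-match indexes and all blank-line indexes) via comprehensions and binary-searches the sorted blank-index table for the first blank at/after the section start.
import Mathlib
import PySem

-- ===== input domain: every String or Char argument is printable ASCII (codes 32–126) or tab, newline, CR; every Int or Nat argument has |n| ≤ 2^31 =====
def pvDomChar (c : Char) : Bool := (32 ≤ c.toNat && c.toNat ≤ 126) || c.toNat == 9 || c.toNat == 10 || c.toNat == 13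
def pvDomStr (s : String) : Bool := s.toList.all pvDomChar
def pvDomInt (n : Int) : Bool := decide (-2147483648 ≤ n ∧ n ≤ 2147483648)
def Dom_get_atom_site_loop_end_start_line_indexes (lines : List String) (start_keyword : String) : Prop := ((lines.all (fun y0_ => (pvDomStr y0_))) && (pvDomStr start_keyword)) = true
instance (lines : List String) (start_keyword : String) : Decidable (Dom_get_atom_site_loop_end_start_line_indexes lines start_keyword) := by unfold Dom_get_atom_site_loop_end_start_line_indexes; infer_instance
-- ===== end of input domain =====

-- B replaces A's sequential keyword-then-blank scans by precomputed index tables plus a binary search over the sorted blank-index table (alternative decomposition, same asymptotic cost).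


-- ===== PORT A =====
-- first loop: 'for i, line in enumerate(lines): if start_keyword in line: start_index = i + 1; break'
def pvAFindStart (start_keyword : String) : List String → Nat → Option Nat
  | [], _ => none
  | line :: rest, i =>
    if PySem.Str.isIn start_keyword line then some (i + 1)
    else pvAFindStart start_keyword rest (i + 1)

-- second loop: 'for i in range(start_index, len(lines)): if lines[i].strip() == '': end_index = i; break'
def pvAFindEnd (lines : List String) (i : Nat) : Option Nat :=
  if h : i < lines.length then
    if PySem.Str.strip lines[i] == "" then some i
    else pvAFindEnd lines (i + 1)
  else none
termination_by lines.length - i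

def get_atom_site_loop_end_start_line_indexes (lines : List String) (start_keyword : String) : Option Int × Option Int :=
  match pvAFindStart start_keyword lines 0 with
  | none => (none, none)
  | some s => (some (Int.ofNat s), (pvAFindEnd lines s).map Int.ofNat)

-- ===== PORT B =====
-- '[i for i, line in enumerate(lines) if <cond line>]' : the list of indexes whose line satisfies cond
def pvIdxWhere (p : String → Bool) : List String → Nat → List Nat
  | [], _ => []
  | line :: rest, i => if p line then i :: pvIdxWhere p rest (i + 1) else pvIdxWhere p rest (i + 1)

-- 'while lo < hi: mid = (lo+hi)//2; …' ('blanks[mid]' is always in range here since mid < hi ≤ len blanks, so getD is exact)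
def pvBSearch (blanks : List Nat) (t : Nat) (lo hi : Nat) : Nat :=
  if lo < hi then
    let mid := (lo + hi) / 2
    if blanks.getD mid 0 < t then pvBSearch blanks t (mid + 1) hi
    else pvBSearch blanks t lo mid
  else lo
termination_by hi - lo

def get_atom_site_loop_end_start_line_indexes_alt (lines : List String) (start_keyword : String) : Option Int × Option Int :=
  match pvIdxWhere (fun line => PySem.Str.isIn start_keyword line) lines 0 with
  | [] => (none, none)
  | m :: _ =>
    let blanks := pvIdxWhere (fun line => PySem.Str.strip line == "") lines 0
    (some (Int.ofNat (m + 1)),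
     (blanks[pvBSearch blanks (m + 1) 0 blanks.length]?).map Int.ofNat)

-- ===== PRECONDITION & SPEC =====
def Spec_get_atom_site_loop_end_start_line_indexes (lines : List String) (start_keyword : String) (out : Option Int × Option Int) : Prop := out = get_atom_site_loop_end_start_line_indexes_alt lines start_keyword
instance (lines : List String) (start_keyword : String) (out : Option Int × Option Int) : Decidable (Spec_get_atom_site_loop_end_start_line_indexes lines start_keyword out) := by unfold Spec_get_atom_site_loop_end_start_line_indexes; infer_instance

-- ===== CLAIM (what is proved, stated in full; the proofs are below) =====
def Claim_equal_get_atom_site_loop_end_start_line_indexes : Prop := ∀ (lines : List String) (start_keyword : String), Dom_get_atom_site_loop_end_start_line_indexes lines start_keyword → Spec_get_atom_site_loop_end_start_line_indexes lines start_keyword (get_atom_site_loop_end_start_line_indexes lines start_keyword)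

-- ===== LEMMAS AND PROOFS =====

-- A's first loop returns the successor of the first index in B's match table
lemma pvAFindStart_eq (kw : String) : ∀ (l : List String) (i : Nat),
    pvAFindStart kw l i = ((pvIdxWhere (fun line => PySem.Str.isIn kw line) l i).head?).map (· + 1) := by
  intro l
  induction l with
  | nil => intro i; rfl
  | cons line rest ih =>
    intro i
    rw [pvAFindStart, pvIdxWhere]
    by_cases hk : PySem.Chars.isIn kw.toList line.toList <;> simp [PySem.Str.isIn, hk, ih]

-- proof-side helper: first blank line of the suffix l, whose first element has absolute index i
def pvBlankScan : List String → Nat → Option Nat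
  | [], _ => none
  | line :: rest, i => if PySem.Str.strip line == "" then some i else pvBlankScan rest (i + 1)

lemma pvAFindEnd_eq_blankScan : ∀ (n : Nat) (l : List String) (i : Nat), l.length - i ≤ n →
    pvAFindEnd l i = pvBlankScan (l.drop i) i := by
  intro n
  induction n with
  | zero =>
    intro l i h
    have hi : l.length ≤ i := by omega
    rw [pvAFindEnd, List.drop_eq_nil_of_le hi]
    simp [pvBlankScan, Nat.not_lt.mpr hi]
  | succ n ih =>
    intro l i h
    rw [pvAFindEnd]
    by_cases hi : i < l.length
    · rw [List.drop_eq_getElem_cons hi, pvBlankScan]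
      simp only [hi, dif_pos]
      by_cases hb : PySem.Str.strip l[i] == ""
      · simp [hb]
      · simp only [hb, Bool.false_eq_true, if_neg, not_false_eq_true]
        exact ih l (i + 1) (by omega)
    · rw [List.drop_eq_nil_of_le (by omega)]
      simp [pvBlankScan, hi]

lemma pvBlankScan_eq_head : ∀ (l : List String) (i : Nat),
    pvBlankScan l i = (pvIdxWhere (fun line => PySem.Str.strip line == "") l i).head? := by
  intro l
  induction l with
  | nil => intro i; rfl
  | cons line rest ih =>
    intro i
    rw [pvBlankScan, pvIdxWhere]
    by_cases hb : PySem.Str.strip line == "" <;> simp [hb, ih]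

lemma pvIdxWhere_mem_ge (p : String → Bool) : ∀ (l : List String) (i b : Nat),
    b ∈ pvIdxWhere p l i → i ≤ b := by
  intro l
  induction l with
  | nil => intro i b h; simp [pvIdxWhere] at h
  | cons line rest ih =>
    intro i b h
    rw [pvIdxWhere] at h
    by_cases hp : p line
    · simp only [hp, if_pos, List.mem_cons] at h
      rcases h with h | h
      · omega
      · have := ih (i + 1) b h; omega
    · simp only [hp, Bool.false_eq_true, if_neg, not_false_eq_true] at h
      have := ih (i + 1) b h; omega

lemma pvIdxWhere_pairwise (p : String → Bool) : ∀ (l : List String) (i : Nat),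
    (pvIdxWhere p l i).Pairwise (· < ·) := by
  intro l
  induction l with
  | nil => intro i; simp [pvIdxWhere]
  | cons line rest ih =>
    intro i
    rw [pvIdxWhere]
    by_cases hp : p line
    · simp only [hp, if_pos]
      refine List.Pairwise.cons ?_ (ih (i + 1))
      intro b hb
      have := pvIdxWhere_mem_ge p rest (i + 1) b hb; omega
    · simp only [hp, Bool.false_eq_true, if_neg, not_false_eq_true]
      exact ih (i + 1)

-- searching for the first index ≥ i+s in the full table = head of the table of the dropped suffix
lemma pvIdxWhere_drop (p : String → Bool) : ∀ (s : Nat) (l : List String) (i : Nat),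
    (pvIdxWhere p l i).find? (fun b => decide (i + s ≤ b)) = (pvIdxWhere p (l.drop s) (i + s)).head? := by
  intro s
  induction s with
  | zero =>
    intro l i
    cases h : pvIdxWhere p l i with
    | nil => simp [h]
    | cons b rest =>
      have hb : i ≤ b := pvIdxWhere_mem_ge p l i b (by rw [h]; exact List.mem_cons_self ..)
      simp only [Nat.add_zero, List.drop_zero, h, List.find?_cons, decide_eq_true hb, List.head?_cons]
  | succ s ih =>
    intro l i
    cases l with
    | nil => simp [pvIdxWhere]
    | cons line rest =>
      rw [pvIdxWhere]
      have hpred : (fun b => decide (i + (s + 1) ≤ b)) = (fun b => decide ((i + 1) + s ≤ b)) := by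
        funext b
        have h' : i + (s + 1) = (i + 1) + s := by omega
        rw [h']
      have hfalse : decide (i + (s + 1) ≤ i) = false := decide_eq_false (by omega)
      have hdrop : (line :: rest).drop (s + 1) = rest.drop s := List.drop_succ_cons ..
      have hidx : i + (s + 1) = (i + 1) + s := by omega
      by_cases hp : p line
      · simp only [hp, if_pos, List.find?_cons, hfalse]
        rw [hpred, ih rest (i + 1)]
        try rw [hdrop]
        try rw [hidx]
      · simp only [hp, Bool.false_eq_true, if_neg, not_false_eq_true]
        rw [hpred, ih rest (i + 1)]
        try rw [hdrop]
        try rw [hidx]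

-- find? returns the element at index r when everything before r fails and position r (if any) succeeds
lemma pvFind?_eq_getElem? : ∀ (xs : List Nat) (p : Nat → Bool) (r : Nat),
    (∀ k, k < r → ∀ (h : k < xs.length), p xs[k] = false) →
    (∀ (h : r < xs.length), p xs[r] = true) →
    xs.find? p = xs[r]? := by
  intro xs
  induction xs with
  | nil => intro p r _ _; simp
  | cons x t ih =>
    intro p r h1 h2
    cases r with
    | zero =>
      have := h2 (by simp)
      simp only [List.getElem_cons_zero] at this
      simp [this]
    | succ r' =>
      have h0 : p x = false := by
        have := h1 0 (by omega) (by simp)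
        simpa using this
      rw [List.find?_cons_of_neg (by simp [h0]), List.getElem?_cons_succ]
      refine ih p r' ?_ ?_
      · intro k hk h
        have := h1 (k + 1) (by omega) (by simpa using Nat.succ_lt_succ h)
        simpa using this
      · intro h
        have := h2 (by simpa using Nat.succ_lt_succ h)
        simpa using this

-- correctness of the binary search on a strictly sorted index table
lemma pvBSearch_spec : ∀ (n : Nat) (xs : List Nat), xs.Pairwise (· < ·) → ∀ (t lo hi : Nat),
    hi - lo ≤ n → lo ≤ hi → hi ≤ xs.length →
    (∀ k, k < lo → ∀ (h : k < xs.length), xs[k] < t) →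
    (∀ k, hi ≤ k → ∀ (h : k < xs.length), t ≤ xs[k]) →
    (∀ k, k < pvBSearch xs t lo hi → ∀ (h : k < xs.length), xs[k] < t) ∧
    (∀ k, pvBSearch xs t lo hi ≤ k → ∀ (h : k < xs.length), t ≤ xs[k]) := by
  intro n
  induction n with
  | zero =>
    intro xs hs t lo hi hn hlohi hhi h1 h2
    have : lo = hi := by omega
    rw [pvBSearch]
    simp only [this, Nat.lt_irrefl, if_neg, not_false_eq_true]
    subst this
    exact ⟨h1, h2⟩
  | succ n ih =>
    intro xs hs t lo hi hn hlohi hhi h1 h2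
    rw [pvBSearch]
    by_cases hlt : lo < hi
    · simp only [hlt, if_pos]
      have hmid1 : lo ≤ (lo + hi) / 2 := by omega
      have hmid2 : (lo + hi) / 2 < hi := by omega
      have hmlen : (lo + hi) / 2 < xs.length := by omega
      have hget : xs.getD ((lo + hi) / 2) 0 = xs[(lo + hi) / 2] := by
        simp [List.getD_eq_getElem?_getD, List.getElem?_eq_getElem hmlen]
      rw [hget]
      have hsorted := List.pairwise_iff_getElem.mp hs
      by_cases hc : xs[(lo + hi) / 2] < t
      · simp only [hc, if_pos]
        refine ih xs hs t ((lo + hi) / 2 + 1) hi (by omega) (by omega) hhi ?_ h2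
        intro k hk h
        by_cases hkk : k < lo
        · exact h1 k hkk h
        · rcases Nat.lt_or_ge k ((lo + hi) / 2) with hk' | hk'
          · exact lt_trans (hsorted k ((lo + hi) / 2) h hmlen hk') hc
          · have : k = (lo + hi) / 2 := by omega
            subst this; exact hc
      · simp only [hc, if_neg, not_false_eq_true]
        refine ih xs hs t lo ((lo + hi) / 2) (by omega) (by omega) (by omega) h1 ?_
        intro k hk h
        replace hc : t ≤ xs[(lo + hi) / 2] := Nat.le_of_not_lt hc
        rcases Nat.lt_or_ge ((lo + hi) / 2) k with hk' | hk'
        · exact le_of_lt (lt_of_le_of_lt hc (hsorted ((lo + hi) / 2) k hmlen h hk'))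
        · have : k = (lo + hi) / 2 := by omega
          subst this; exact hc
    · simp only [hlt, if_neg, not_false_eq_true]
      have : lo = hi := by omega
      subst this
      exact ⟨h1, h2⟩

-- ===== VERDICT (by name: the statement is the Claim_ definition above) =====
theorem get_atom_site_loop_end_start_line_indexes_spec : Claim_equal_get_atom_site_loop_end_start_line_indexes := by
  intro lines kw _hDom
  unfold Spec_get_atom_site_loop_end_start_line_indexes
  unfold get_atom_site_loop_end_start_line_indexes get_atom_site_loop_end_start_line_indexes_alt
  rw [pvAFindStart_eq]
  cases h : pvIdxWhere (fun line => PySem.Str.isIn kw line) lines 0 with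
  | nil => simp
  | cons m rest =>
    simp only [List.head?_cons, Option.map_some]
    refine Prod.ext rfl ?_
    simp only
    congr 1
    -- chain A's blank scan to B's binary-searched table lookup
    set blanks := pvIdxWhere (fun line => PySem.Str.strip line == "") lines 0 with hblanks
    set r := pvBSearch blanks (m + 1) 0 blanks.length with hr
    have hbs := pvBSearch_spec blanks.length blanks
      (pvIdxWhere_pairwise _ lines 0) (m + 1) 0 blanks.length
      (by omega) (by omega) (le_refl _)
      (by intro k hk _; omega) (by intro k hk h; omega)
    rw [pvAFindEnd_eq_blankScan lines.length lines (m + 1) (by omega),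
        pvBlankScan_eq_head]
    have hd := pvIdxWhere_drop (fun line => PySem.Str.strip line == "") (m + 1) lines 0
    simp only [Nat.zero_add] at hd
    rw [← hd, ← hblanks]
    refine pvFind?_eq_getElem? blanks (fun b => decide (m + 1 ≤ b)) r ?_ ?_
    · intro k hk hlen
      have := hbs.1 k hk hlen
      simp; omega
    · intro hlen
      have := hbs.2 r (le_refl r) hlen
      simpa using this
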